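-- pv_equiv track=rewrite | github.com/Sur818/Coding-Projects | python programming/sort palindrome word.py | sort_palindromeword
-- ===== SOURCE A (Python) =====
-- def ispalindrome(x):
-- 	if x==x[::-1]:
-- 		return True
-- 	return False
--
-- def sort_palindromeword(l):
-- 	new_list=[]
-- 	for x in l:
-- 		if ispalindrome(x):
-- 			new_list.append(x)
-- 	new_list.sort()
-- 	j=0
-- 	for i in range(len(l)):
-- 		if ispalindrome(l[i]):
-- 			l[i]=new_list[j]
-- 			j+=1
-- 	return ' '.join(l)
-- ===== SOURCE B (Python) =====
-- def sort_palindromeword(l):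
--     pool = [x for x in l if x == x[::-1]]
--     out = []
--     for x in l:
--         if x == x[::-1]:
--             m = min(pool)
--             pool.remove(m)
--             out.append(m)
--         else:
--             out.append(x)
--     l[:] = out
--     return ' '.join(l)
-- ===== Notes on version B (the rewrite author's own statement) =====
-- stated objective: alternative
-- what changed: B never calls sort: it keeps a pool of the palindromic words and builds the result in a single pass, extracting min(pool) (and removing it) at each palindrome slot, so the sorted order arises by repeated min-extraction instead of A's sort-then-second-scan writeback.
import Mathlib
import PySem

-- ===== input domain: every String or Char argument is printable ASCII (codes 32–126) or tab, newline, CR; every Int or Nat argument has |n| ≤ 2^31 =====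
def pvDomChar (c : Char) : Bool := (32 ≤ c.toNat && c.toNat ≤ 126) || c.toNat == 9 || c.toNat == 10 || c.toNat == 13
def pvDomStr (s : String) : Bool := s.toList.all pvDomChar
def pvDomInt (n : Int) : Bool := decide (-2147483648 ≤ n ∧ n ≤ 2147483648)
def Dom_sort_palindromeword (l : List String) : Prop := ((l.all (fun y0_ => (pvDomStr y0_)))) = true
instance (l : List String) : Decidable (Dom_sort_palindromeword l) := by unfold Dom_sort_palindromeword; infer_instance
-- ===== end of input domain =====

-- B never sorts: one pass extracts min(pool) of the remaining palindromes at each palindrome slot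
-- (selection by repeated min-extraction) instead of A's sort-then-second-scan writeback; the
-- equivalence is about the return value (both Pythons leave l mutated to the same final list).

-- ===== PORT A =====
def ispalindrome (x : String) : Bool :=
  if x = (PySem.Str.slice? x none none (-1)).getD "" then true else false

-- writeback loop of A ('for i in range(len(l)): if ispalindrome(l[i]): l[i]=new_list[j]; j+=1'),
-- as the structural recursion over l carrying j; j always stays below new_list.length (new_list
-- holds one word per palindrome of l), so the `getD` default "" is never used and this is exact.
def sortpwWrite (lst new_list : List String) (j : Nat) : List String :=
  match lst with
  | [] => []
  | x :: xs =>
    if ispalindrome x then new_list.getD j "" :: sortpwWrite xs new_list (j + 1)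
    else x :: sortpwWrite xs new_list j

def sort_palindromeword (l : List String) : String :=
  let new_list := l.foldl (fun acc x => if ispalindrome x then acc ++ [x] else acc) []
  let new_list := PySem.List.sorted new_list (fun x => x) false
  PySem.Str.join " " (sortpwWrite l new_list 0)

-- ===== PORT B =====
-- single pass with state (pool, out); the `none` branch of min? is Python's ValueError on
-- min([]) and is never reached (the pool holds one word per remaining palindrome slot),
-- likewise remove?'s default: m = min(pool) is always a member.
def sort_palindromeword_alt (l : List String) : String :=
  let pool0 := l.foldl (fun acc x => if x = (PySem.Str.slice? x none none (-1)).getD "" then acc ++ [x] else acc) []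
  let st := l.foldl (fun (st : List String × List String) x =>
      if x = (PySem.Str.slice? x none none (-1)).getD "" then
        match PySem.List.min? st.1 (fun y => y) with
        | some m => ((PySem.List.remove? st.1 m).getD st.1, st.2 ++ [m])
        | none => (st.1, st.2 ++ [x])
      else (st.1, st.2 ++ [x])) (pool0, ([] : List String))
  PySem.Str.join " " st.2

-- ===== PRECONDITION & SPEC =====
def Spec_sort_palindromeword (l : List String) (out : String) : Prop := out = sort_palindromeword_alt l
instance (l : List String) (out : String) : Decidable (Spec_sort_palindromeword l out) := by unfold Spec_sort_palindromeword; infer_instance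

-- ===== CLAIM (what is proved, stated in full; the proofs are below) =====
def Claim_equal_sort_palindromeword : Prop := ∀ (l : List String), Dom_sort_palindromeword l → Spec_sort_palindromeword l (sort_palindromeword l)

-- ===== LEMMAS AND PROOFS =====

-- common description of the final list: palindrome slots of xs replaced in order by ws
def sortpwAssign (xs ws : List String) : List String :=
  match xs, ws with
  | [], _ => []
  | x :: xs', ws =>
    if x = (PySem.Str.slice? x none none (-1)).getD "" then
      match ws with
      | [] => x :: xs'
      | w :: ws' => w :: sortpwAssign xs' ws'
    else x :: sortpwAssign xs' ws

theorem ispal_eq (x : String) :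
    ispalindrome x = decide (x = (PySem.Str.slice? x none none (-1)).getD "") := by
  unfold ispalindrome; split_ifs with h
  · exact (decide_eq_true h).symm
  · exact (decide_eq_false h).symm

theorem sortpwWrite_eq_assign (lst : List String) : ∀ (ws : List String) (j : Nat),
    j + lst.countP ispalindrome ≤ ws.length →
    sortpwWrite lst ws j = sortpwAssign lst (ws.drop j) := by
  induction lst with
  | nil => intro ws j _; simp [sortpwWrite, sortpwAssign]
  | cons x xs ih =>
    intro ws j h
    rw [List.countP_cons] at h
    by_cases hp : x = (PySem.Str.slice? x none none (-1)).getD ""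
    · have hpal : ispalindrome x = true := by rw [ispal_eq]; exact decide_eq_true hp
      have hj : j < ws.length := by
        have : 1 ≤ (if ispalindrome x then 1 else 0) := by simp [hpal]
        omega
      have hdrop : ws.drop j = ws[j] :: ws.drop (j + 1) := List.drop_eq_getElem_cons hj
      have hgetD : ws.getD j "" = ws[j] := by
        rw [List.getD_eq_getElem?_getD, List.getElem?_eq_getElem hj]; rfl
      rw [sortpwWrite, hdrop]
      simp only [sortpwAssign, if_pos hp, hpal, if_pos, hgetD]
      refine congrArg _ ?_
      exact ih ws (j + 1) (by simp [hpal] at h; omega)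
    · have hpal : ispalindrome x = false := by rw [ispal_eq]; exact decide_eq_false hp
      rw [sortpwWrite]
      simp only [sortpwAssign, if_neg hp, hpal, Bool.false_eq_true, if_false]
      refine congrArg _ ?_
      exact ih ws j (by simp [hpal] at h; omega)

-- selection step: extracting the minimum and its removal peels the head off the sorted pool
theorem min_remove_step (pool : List String) (m : String)
    (hm : PySem.List.min? pool (fun y => y) = some m) :
    PySem.List.sorted pool (fun y => y) false
      = m :: PySem.List.sorted ((PySem.List.remove? pool m).getD pool) (fun y => y) false := by
  have hmem : m ∈ pool := PySem.List.min?_mem hm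
  have hrem : (PySem.List.remove? pool m).getD pool = pool.erase m := by
    rw [PySem.List.remove?_eq_some_erase pool m hmem]; rfl
  rw [hrem]
  refine PySem.List.sorted_id_eq_of_perm_of_pairwise pool (m :: PySem.List.sorted (pool.erase m) (fun y => y) false) ?_ ?_
  · exact ((PySem.List.sorted_perm _ _ _).cons m).trans (List.perm_cons_erase hmem).symm
  · refine List.pairwise_cons.mpr ⟨?_, ?_⟩
    · intro y hy
      exact PySem.List.min?_isMin hm y
        (List.mem_of_mem_erase ((PySem.List.mem_sorted _ _ _ _).mp hy))
    · exact PySem.List.sorted_pairwise _ _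

-- B's one-pass loop equals assignment of the sorted pool at the palindrome slots
theorem bfold_eq_assign (l : List String) : ∀ (pool out : List String),
    l.countP ispalindrome ≤ pool.length →
    (l.foldl (fun (st : List String × List String) x =>
        if x = (PySem.Str.slice? x none none (-1)).getD "" then
          match PySem.List.min? st.1 (fun y => y) with
          | some m => ((PySem.List.remove? st.1 m).getD st.1, st.2 ++ [m])
          | none => (st.1, st.2 ++ [x])
        else (st.1, st.2 ++ [x])) (pool, out)).2
      = out ++ sortpwAssign l (PySem.List.sorted pool (fun y => y) false) := by
  induction l with
  | nil => intro pool out _; simp [sortpwAssign]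
  | cons x xs ih =>
    intro pool out h
    rw [List.countP_cons] at h
    by_cases hp : x = (PySem.Str.slice? x none none (-1)).getD ""
    · have hpal : ispalindrome x = true := by rw [ispal_eq]; exact decide_eq_true hp
      have hne : pool ≠ [] := by
        intro hnil; subst hnil; simp [hpal] at h
      obtain ⟨m, hm⟩ : ∃ m, PySem.List.min? pool (fun y => y) = some m := by
        cases hmin : PySem.List.min? pool (fun y => y) with
        | none => exact absurd ((PySem.List.min?_eq_none_iff pool (fun y => y)).mp hmin) hne
        | some m => exact ⟨m, rfl⟩
      have hmem : m ∈ pool := PySem.List.min?_mem hm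
      have hrem : (PySem.List.remove? pool m).getD pool = pool.erase m := by
        rw [PySem.List.remove?_eq_some_erase pool m hmem]; rfl
      have hlen : (pool.erase m).length = pool.length - 1 := List.length_erase_of_mem hmem
      have hstep := min_remove_step pool m hm
      rw [List.foldl_cons]
      simp only [if_pos hp, hm]
      rw [hstep]
      simp only [sortpwAssign, if_pos hp]
      rw [ih _ (out ++ [m]) (by simp [hpal] at h; rw [hrem, hlen]; omega)]
      rw [hrem, List.append_assoc, List.singleton_append]
    · have hpal : ispalindrome x = false := by rw [ispal_eq]; exact decide_eq_false hp
      rw [List.foldl_cons]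
      simp only [if_neg hp]
      rw [ih pool (out ++ [x]) (by simp [hpal] at h; omega)]
      simp only [sortpwAssign, if_neg hp]
      rw [List.append_assoc, List.singleton_append]

-- ===== VERDICT (by name: the statement is the Claim_ definition above) =====
theorem sort_palindromeword_spec : Claim_equal_sort_palindromeword := by
  intro l _
  unfold Spec_sort_palindromeword sort_palindromeword sort_palindromeword_alt
  have hnew : l.foldl (fun acc x => if ispalindrome x then acc ++ [x] else acc) ([] : List String)
      = l.filter ispalindrome := by
    simpa using PySem.List.foldl_append_if_eq_filter ispalindrome l []
  have hfun : (fun (acc : List String) x => if x = (PySem.Str.slice? x none none (-1)).getD "" then acc ++ [x] else acc)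
      = (fun acc x => if ispalindrome x then acc ++ [x] else acc) := by
    funext acc x
    simp only [ispal_eq, decide_eq_true_eq]
  have hnew' : l.foldl (fun acc x => if x = (PySem.Str.slice? x none none (-1)).getD "" then acc ++ [x] else acc) ([] : List String)
      = l.filter ispalindrome := by rw [hfun, hnew]
  simp only [hnew, hnew']
  rw [sortpwWrite_eq_assign l _ 0
    (by
      have := PySem.List.length_sorted (l.filter ispalindrome) (fun x => x) false
      simp [List.countP_eq_length_filter, this])]
  rw [List.drop_zero]
  rw [bfold_eq_assign l (l.filter ispalindrome) []
    (by simp [List.countP_eq_length_filter])]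
  rw [List.nil_append]
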